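-- pv_equiv track=rewrite | github.com/Sandhya-Akula/codemind-python | Strictly_EVEN.py | strickeven
-- ===== SOURCE A (Python) =====
-- def strickeven(arr):
--     if len(arr)==1:
--         return True
--     for i in range(len(arr)):
--         if arr[i]%2==0:
--             if i%2!=0:
--                 return False
--     return True
-- ===== SOURCE B (Python) =====
-- def strickeven(arr):
--     # Consume the list two at a time through an iterator: the element at an
--     # even position is irrelevant, only its odd-position successor must be odd.
--     it = iter(arr)
--     for _ in it:                 # even-position element: skipped
--         x = next(it, None)       # its odd-position partner
--         if x is None:            # odd length: no partner left
--             return True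
--         if x % 2 == 0:
--             return False
--     return True
-- ===== Notes on version B (the rewrite author's own statement) =====
-- stated objective: alternative
-- what changed: B drops A's len==1 guard and its per-index filtering (arr[i]%2 with an inner i%2 test): it consumes the list two elements per iteration through an iterator, discarding each even-position element outright and failing as soon as an odd-position element is even, with no index arithmetic at all.
import Mathlib
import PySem

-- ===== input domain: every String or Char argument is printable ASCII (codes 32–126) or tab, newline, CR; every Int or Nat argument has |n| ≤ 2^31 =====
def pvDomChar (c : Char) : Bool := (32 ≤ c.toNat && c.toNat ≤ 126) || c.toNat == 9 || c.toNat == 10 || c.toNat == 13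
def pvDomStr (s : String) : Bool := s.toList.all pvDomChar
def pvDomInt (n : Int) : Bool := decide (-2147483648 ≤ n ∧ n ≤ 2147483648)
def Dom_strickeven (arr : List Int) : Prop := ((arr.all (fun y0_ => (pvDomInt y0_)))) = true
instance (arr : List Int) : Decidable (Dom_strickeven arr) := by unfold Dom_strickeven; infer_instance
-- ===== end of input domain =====

-- B consumes the list two elements per iteration (skip the even-position one, test its odd-position partner), no index arithmetic (objective: alternative).

-- ===== PORT A =====
-- the for-loop over range(len(arr)) with arr[i]: iterating the (index, value) pairs
def strickevenAux : List (Int × Int) → Bool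
  | [] => true
  | (i, x) :: rest =>
    if PySem.Int.mod x 2 == 0 then
      if PySem.Int.mod i 2 != 0 then false
      else strickevenAux rest
    else strickevenAux rest

def strickeven (arr : List Int) : Bool :=
  if arr.length == 1 then true
  else strickevenAux (PySem.List.enumerate arr 0)

-- ===== PORT B =====
-- the for-loop over the iterator consuming two elements per step:
-- [] = iterator exhausted before the loop head; [_] = next(it, None) returned None
def strickevenGo : List Int → Bool
  | [] => true
  | [_] => true
  | _ :: y :: rest =>
    if PySem.Int.mod y 2 == 0 then false
    else strickevenGo rest

def strickeven_alt (arr : List Int) : Bool := strickevenGo arr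

-- ===== PRECONDITION & SPEC =====
def Spec_strickeven (arr : List Int) (out : Bool) : Prop := out = strickeven_alt arr
instance (arr : List Int) (out : Bool) : Decidable (Spec_strickeven arr out) := by unfold Spec_strickeven; infer_instance

-- ===== CLAIM (what is proved, stated in full; the proofs are below) =====
def Claim_equal_strickeven : Prop := ∀ (arr : List Int), Dom_strickeven arr → Spec_strickeven arr (strickeven arr)

-- ===== LEMMAS AND PROOFS =====
theorem strickevenAux_eq_go (arr : List Int) :
    ∀ (s : Int), s % 2 = 0 → strickevenAux (PySem.List.enumerate arr s) = strickevenGo arr := by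
  have hm : ∀ a : Int, PySem.Int.mod a 2 = a % 2 :=
    fun a => PySem.Int.mod_eq_emod_of_pos (by omega)
  induction arr using strickevenGo.induct with
  | case1 =>
    intro s _
    simp [PySem.List.enumerate_nil, strickevenAux, strickevenGo]
  | case2 x =>
    intro s hs
    simp [PySem.List.enumerate_cons, PySem.List.enumerate_nil, strickevenAux,
      strickevenGo]
    omega
  | case3 x y rest hy =>
    intro s hs
    have e2 : (s + 1) % 2 = 1 := by omega
    rw [hm] at hy
    have hy' : y % 2 = 0 := by simpa using hy
    simp only [PySem.List.enumerate_cons, strickevenAux, strickevenGo, hm]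
    rcases Int.emod_two_eq x with hx | hx <;> simp [hx, hy', e2]
  | case4 x y rest hy ih =>
    intro s hs
    have e1 : ¬ (s % 2 = 1) := by omega
    rw [hm] at hy
    have hy' : ¬ (y % 2 = 0) := by simpa using hy
    have ihr := ih (s + 1 + 1) (by omega)
    simp only [PySem.List.enumerate_cons, strickevenAux, strickevenGo, hm, ihr]
    rcases Int.emod_two_eq x with hx | hx <;> simp [hx, hy', e1]

-- ===== VERDICT (by name: the statement is the Claim_ definition above) =====
theorem strickeven_spec : Claim_equal_strickeven := by
  intro arr _
  unfold Spec_strickeven strickeven strickeven_alt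
  have h := strickevenAux_eq_go arr 0 (by decide)
  split_ifs with hlen
  · match arr, hlen with
    | [x], _ => simp [strickevenGo]
  · exact h
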